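-- pv_equiv track=rewrite | github.com/hhuslamlab/modeling_spanish_acl | scripts/cell_combinations/cell_combinations.py | get_prediction_status
-- ===== SOURCE A (Python) =====
-- def get_prediction_status(tgts, preds, shapes):
--     total = []
--     total_l = []
--     total_nl = []
--
--     for truth, pred, shape in zip(tgts, preds, shapes):
--         if shape == "NL":
--             if truth == pred:
--                 total.append(True)
--                 total_nl.append(True)
--             if truth != pred:
--                 total.append(False)
--                 total_nl.append(False)
--
--         if shape == "L":
--             if pred == truth:
--                 total_l.append(True)
--                 total.append(True)
--             if pred != truth:
--                 total.append(False)
--                 total_l.append(False)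
--
--     return total, total_l, total_nl
-- ===== SOURCE B (Python) =====
-- def get_prediction_status(tgts, preds, shapes):
--     triples = list(zip(tgts, preds, shapes))
--     total = [t == p for t, p, s in triples if s in ("L", "NL")]
--     total_l = [t == p for t, p, s in triples if s == "L"]
--     total_nl = [t == p for t, p, s in triples if s == "NL"]
--     return total, total_l, total_nl
-- ===== Notes on version B (the rewrite author's own statement) =====
-- stated objective: simpler
-- what changed: The single fused loop maintaining three accumulators is split into three independent filtered comprehensions over zip(tgts, preds, shapes), one per output list.
import Mathlib
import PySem

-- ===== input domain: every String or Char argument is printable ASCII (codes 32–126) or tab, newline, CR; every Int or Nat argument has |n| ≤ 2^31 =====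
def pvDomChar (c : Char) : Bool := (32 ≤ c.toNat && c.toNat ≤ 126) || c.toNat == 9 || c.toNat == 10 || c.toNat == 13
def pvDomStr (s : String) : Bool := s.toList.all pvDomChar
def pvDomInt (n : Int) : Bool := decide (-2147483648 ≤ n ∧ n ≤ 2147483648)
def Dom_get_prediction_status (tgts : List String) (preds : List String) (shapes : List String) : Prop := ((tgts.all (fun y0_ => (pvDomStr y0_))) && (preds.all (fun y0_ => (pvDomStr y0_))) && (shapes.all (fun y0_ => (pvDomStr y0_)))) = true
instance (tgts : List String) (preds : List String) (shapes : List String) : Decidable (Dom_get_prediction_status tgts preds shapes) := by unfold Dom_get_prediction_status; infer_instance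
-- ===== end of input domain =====

-- B replaces the single fused loop with three independent filtered passes over the zipped triples (objective: simpler).

-- Python zip over three lists (truncates to the shortest), shared by both ports.
def pyZip3 : List String → List String → List String → List (String × String × String)
  | t :: ts, p :: ps, s :: ss => (t, p, s) :: pyZip3 ts ps ss
  | _, _, _ => []

-- ===== PORT A =====
-- the loop body of A: one iteration updating the three accumulators (total, total_l, total_nl)
def pvStepA (st : List Bool × List Bool × List Bool) (x : String × String × String) :
    List Bool × List Bool × List Bool :=
  let (total, total_l, total_nl) := st
  let (truth, pred, shape) := x
  let (total, total_nl) :=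
    if shape == "NL" then
      let (total, total_nl) := if truth == pred then (total ++ [true], total_nl ++ [true]) else (total, total_nl)
      if truth != pred then (total ++ [false], total_nl ++ [false]) else (total, total_nl)
    else (total, total_nl)
  let (total, total_l) :=
    if shape == "L" then
      let (total_l, total) := if pred == truth then (total_l ++ [true], total ++ [true]) else (total_l, total)
      if pred != truth then (total ++ [false], total_l ++ [false]) else (total, total_l)
    else (total, total_l)
  (total, total_l, total_nl)

def get_prediction_status (tgts : List String) (preds : List String) (shapes : List String) : List Bool × List Bool × List Bool :=
  (pyZip3 tgts preds shapes).foldl pvStepA ([], [], [])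

-- ===== PORT B =====
def get_prediction_status_alt (tgts : List String) (preds : List String) (shapes : List String) : List Bool × List Bool × List Bool :=
  let triples := pyZip3 tgts preds shapes
  ((triples.filter (fun x => x.2.2 == "L" || x.2.2 == "NL")).map (fun x => x.1 == x.2.1),
   (triples.filter (fun x => x.2.2 == "L")).map (fun x => x.1 == x.2.1),
   (triples.filter (fun x => x.2.2 == "NL")).map (fun x => x.1 == x.2.1))

-- ===== PRECONDITION & SPEC =====
def Spec_get_prediction_status (tgts : List String) (preds : List String) (shapes : List String) (out : List Bool × List Bool × List Bool) : Prop := out = get_prediction_status_alt tgts preds shapes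
instance (tgts : List String) (preds : List String) (shapes : List String) (out : List Bool × List Bool × List Bool) : Decidable (Spec_get_prediction_status tgts preds shapes out) := by unfold Spec_get_prediction_status; infer_instance

-- ===== CLAIM (what is proved, stated in full; the proofs are below) =====
def Claim_equal_get_prediction_status : Prop := ∀ (tgts : List String) (preds : List String) (shapes : List String), Dom_get_prediction_status tgts preds shapes → Spec_get_prediction_status tgts preds shapes (get_prediction_status tgts preds shapes)

-- ===== LEMMAS AND PROOFS =====

-- loop invariant: folding A's step from any accumulator appends exactly B's three filtered/mapped lists
theorem foldl_stepA (z : List (String × String × String)) :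
    ∀ (a b c : List Bool),
      z.foldl pvStepA (a, b, c) =
        (a ++ (z.filter (fun x => x.2.2 == "L" || x.2.2 == "NL")).map (fun x => x.1 == x.2.1),
         b ++ (z.filter (fun x => x.2.2 == "L")).map (fun x => x.1 == x.2.1),
         c ++ (z.filter (fun x => x.2.2 == "NL")).map (fun x => x.1 == x.2.1)) := by
  induction z with
  | nil => intro a b c; simp
  | cons hd tl ih =>
    intro a b c
    obtain ⟨t, p, s⟩ := hd
    have hLNL : ¬ ((s == "NL") = true ∧ (s == "L") = true) := by
      rintro ⟨h1, h2⟩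
      simp only [beq_iff_eq] at h1 h2
      rw [h1] at h2; exact absurd h2 (by decide)
    simp only [List.foldl_cons, List.filter_cons, List.map, pvStepA]
    by_cases hnl : (s == "NL") = true
    · have hl : (s == "L") = false := by
        by_contra h
        exact hLNL ⟨hnl, by revert h; cases (s == "L") <;> simp⟩
      by_cases htp : (t == p) = true
      · simp [hnl, hl, htp, bne, ih]
      · have htp' : (t == p) = false := by revert htp; cases (t == p) <;> simp
        have hpt : (p == t) = false := by
          simp only [beq_eq_false_iff_ne] at htp' ⊢
          exact fun h => htp' h.symm
        simp [hnl, hl, htp', hpt, bne, ih]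
    · have hnl' : (s == "NL") = false := by revert hnl; cases (s == "NL") <;> simp
      by_cases hl : (s == "L") = true
      · by_cases hpt : (p == t) = true
        · have htp : (t == p) = true := by
            simp only [beq_iff_eq] at hpt ⊢; exact hpt.symm
          simp [hnl', hl, hpt, htp, bne, ih]
        · have hpt' : (p == t) = false := by revert hpt; cases (p == t) <;> simp
          have htp : (t == p) = false := by
            simp only [beq_eq_false_iff_ne] at hpt' ⊢
            exact fun h => hpt' h.symm
          simp [hnl', hl, hpt', htp, bne, ih]
      · have hl' : (s == "L") = false := by revert hl; cases (s == "L") <;> simp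
        simp [hnl', hl', bne, ih]

-- ===== VERDICT (by name: the statement is the Claim_ definition above) =====
theorem get_prediction_status_spec : Claim_equal_get_prediction_status := by
  intro tgts preds shapes _
  unfold Spec_get_prediction_status get_prediction_status get_prediction_status_alt
  rw [foldl_stepA]
  simp
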